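-- pv_equiv track=rewrite | github.com/R-Thomm/Robin-Master | PyModules/epos.py | session_parse
-- ===== SOURCE A (Python) =====
-- def session_parse(data, key):
--     logs = []
--     annotations = []
--     data_key = []
--     j = 0
--     for i,line in enumerate(data):
--         if len(line)>4 and line[4]=='annotate':
--             annotations.append([*line[:2], ' '.join(line[5:])])
--             logs.append(data[j:i])
--             j=i+1
--         elif key is None or (len(line)>2 and line[2]==key):
--             data_key.append(line)
--     logs.append(data[j:i+1])
--     return logs, annotations, data_key
-- ===== SOURCE B (Python) =====
-- def session_parse(data, key):
--     # Three independent passes (comprehensions + a per-line segment builder)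
--     # instead of A's single fused index/slice loop. Return value only; no slicing indices.
--     def is_annot(line):
--         return len(line) > 4 and line[4] == 'annotate'
--
--     annotations = [line[:2] + [' '.join(line[5:])] for line in data if is_annot(line)]
--     data_key = [line for line in data
--                 if not is_annot(line)
--                 and (key is None or (len(line) > 2 and line[2] == key))]
--     logs = [[]]
--     for line in data:
--         if is_annot(line):
--             logs.append([])
--         else:
--             logs[-1].append(line)
--     return logs, annotations, data_key
-- ===== Notes on version B (the rewrite author's own statement) =====
-- stated objective: simpler
-- what changed: A's single fused loop over enumerate(data) with slice indices i/j is replaced by three independent passes: two comprehensions (annotations, data_key) and an index-free segment builder that starts logs=[[]] and appends each non-annotate line to the last segment.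
-- outside the precondition, e.g. on session_parse([], None): A raises NameError, B returns ([[]], [], [])
import Mathlib
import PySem

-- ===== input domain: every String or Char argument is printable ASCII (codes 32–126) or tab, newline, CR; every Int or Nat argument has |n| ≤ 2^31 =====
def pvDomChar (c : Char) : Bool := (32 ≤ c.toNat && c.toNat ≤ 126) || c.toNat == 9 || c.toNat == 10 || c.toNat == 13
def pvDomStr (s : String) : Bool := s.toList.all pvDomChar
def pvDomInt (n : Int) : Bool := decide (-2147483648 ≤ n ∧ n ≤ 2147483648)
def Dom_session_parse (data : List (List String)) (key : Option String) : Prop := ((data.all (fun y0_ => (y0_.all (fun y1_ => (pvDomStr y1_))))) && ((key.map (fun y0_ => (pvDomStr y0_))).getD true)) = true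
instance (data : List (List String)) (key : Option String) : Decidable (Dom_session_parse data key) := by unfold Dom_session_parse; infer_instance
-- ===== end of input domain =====

-- B replaces A's fused enumerate/slice loop by three independent passes (two
-- comprehensions and a per-line segment builder with no indices); objective: simpler.
-- Return value only (neither program mutates its arguments).

-- ===== PORT A =====
-- A's for-loop over enumerate(data): state (logs, annotations, data_key, j), index i.
def sessionLoopA (data : List (List String)) (key : Option String) :
    List (List String) → Nat →
    List (List (List String)) × List (List String) × List (List String) × Nat →
    List (List (List String)) × List (List String) × List (List String) × Nat
  | [], _, st => st
  | line :: rest, i, (logs, ann, dk, j) =>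
    if decide (line.length > 4) && (PySem.List.pyGet? line 4 == some "annotate") then
      sessionLoopA data key rest (i + 1)
        (logs ++ [PySem.List.slice data (some (j : Int)) (some (i : Int))],
         ann ++ [PySem.List.slice line (some 0) (some 2) ++
                 [PySem.Str.join " " (PySem.List.slice line (some 5) none)]],
         dk, i + 1)
    else if key == none || (decide (line.length > 2) && (PySem.List.pyGet? line 2 == key)) then
      sessionLoopA data key rest (i + 1) (logs, ann, dk ++ [line], j)
    else
      sessionLoopA data key rest (i + 1) (logs, ann, dk, j)

def session_parse (data : List (List String)) (key : Option String) :
    List (List (List String)) × List (List String) × List (List String) :=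
  match data with
  | [] => ([], [], [])  -- Python raises NameError here (i unbound); excluded by Pre_
  | _ :: _ =>
    let st := sessionLoopA data key data 0 ([], [], [], 0)
    -- final logs.append(data[j:i+1]); after the loop i+1 = len(data)
    (st.1 ++ [PySem.List.slice data (some (st.2.2.2 : Int)) (some (data.length : Int))],
     st.2.1, st.2.2.1)

-- ===== PORT B =====
def pvIsAnnot (line : List String) : Bool :=
  decide (line.length > 4) && (PySem.List.pyGet? line 4 == some "annotate")

-- logs[-1].append(line)
def pvAppendLast (logs : List (List (List String))) (line : List String) :
    List (List (List String)) :=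
  match logs with
  | [] => []
  | [s] => [s ++ [line]]
  | s :: rest => s :: pvAppendLast rest line

def session_parse_alt (data : List (List String)) (key : Option String) :
    List (List (List String)) × List (List String) × List (List String) :=
  let annotations := (data.filter pvIsAnnot).map
      (fun line => PySem.List.slice line (some 0) (some 2) ++
                   [PySem.Str.join " " (PySem.List.slice line (some 5) none)])
  let data_key := data.filter (fun line =>
      !(pvIsAnnot line) &&
      (key == none || (decide (line.length > 2) && (PySem.List.pyGet? line 2 == key))))
  let logs := data.foldl
      (fun logs line => if pvIsAnnot line then logs ++ [[]] else pvAppendLast logs line) [[]]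
  (logs, annotations, data_key)

-- ===== PRECONDITION & SPEC =====
-- Pre_ excludes only empty data, on which A raises NameError (the final logs.append uses the loop variable i).
def Pre_session_parse (data : List (List String)) (key : Option String) : Prop := data ≠ []
instance (data : List (List String)) (key : Option String) : Decidable (Pre_session_parse data key) := by unfold Pre_session_parse; infer_instance
def pvWitness_session_parse : List (List String) × Option String := ([["a", "b", "c"]], none)

def Spec_session_parse (data : List (List String)) (key : Option String) (out : List (List (List String)) × List (List String) × List (List String)) : Prop := out = session_parse_alt data key
instance (data : List (List String)) (key : Option String) (out : List (List (List String)) × List (List String) × List (List String)) : Decidable (Spec_session_parse data key out) := by unfold Spec_session_parse; infer_instance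

-- ===== CLAIM (what is proved, stated in full; the proofs are below) =====
def Claim_equal_session_parse : Prop := ∀ (data : List (List String)) (key : Option String), Dom_session_parse data key → Pre_session_parse data key → Spec_session_parse data key (session_parse data key)

-- ===== LEMMAS AND PROOFS =====

theorem pvAppendLast_append (logs : List (List (List String))) (cur : List (List String)) (line : List String) :
    pvAppendLast (logs ++ [cur]) line = logs ++ [cur ++ [line]] := by
  induction logs with
  | nil => rfl
  | cons s rest ih =>
    cases rest with
    | nil => rfl
    | cons t ts =>
      show s :: pvAppendLast ((t :: ts) ++ [cur]) line = s :: ((t :: ts) ++ [cur ++ [line]])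
      rw [ih]

theorem pvSlice_succ (data : List (List String)) (line : List String)
    (rest : List (List String)) (i j : Nat) (hd : data.drop i = line :: rest) (hj : j ≤ i) :
    PySem.List.slice data (some (j : Int)) (some ((i + 1 : Nat) : Int)) =
      PySem.List.slice data (some (j : Int)) (some (i : Int)) ++ [line] := by
  have hi : data[i]? = some line := by
    rw [← List.head?_drop, hd]; rfl
  rw [PySem.List.slice_natCast, PySem.List.slice_natCast]
  have h1 : i + 1 - j = (i - j) + 1 := by omega
  rw [h1, List.take_add_one]
  have h2 : (data.drop j)[i - j]? = some line := by
    rw [List.getElem?_drop]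
    have hji : j + (i - j) = i := by omega
    rw [hji, hi]
  rw [h2]
  rfl

-- main invariant: A's loop, with the pending segment data[j:len] attached, computes B's fold.
theorem sessionLoopA_inv (data : List (List String)) (key : Option String) :
    ∀ (rest : List (List String)) (i j : Nat)
      (logs : List (List (List String))) (ann dk : List (List String)),
      data.drop i = rest → j ≤ i → i ≤ data.length →
      (sessionLoopA data key rest i (logs, ann, dk, j)).2.1 =
          ann ++ (rest.filter pvIsAnnot).map
            (fun line => PySem.List.slice line (some 0) (some 2) ++
                         [PySem.Str.join " " (PySem.List.slice line (some 5) none)]) ∧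
      (sessionLoopA data key rest i (logs, ann, dk, j)).2.2.1 =
          dk ++ rest.filter (fun line =>
            !(pvIsAnnot line) &&
            (key == none || (decide (line.length > 2) && (PySem.List.pyGet? line 2 == key)))) ∧
      (sessionLoopA data key rest i (logs, ann, dk, j)).1 ++
          [PySem.List.slice data (some (((sessionLoopA data key rest i (logs, ann, dk, j)).2.2.2 : Nat) : Int))
            (some (data.length : Int))] =
        rest.foldl
          (fun logs line => if pvIsAnnot line then logs ++ [[]] else pvAppendLast logs line)
          (logs ++ [PySem.List.slice data (some (j : Int)) (some (i : Int))]) := by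
  intro rest
  induction rest with
  | nil =>
    intro i j logs ann dk hd hj hi
    have hlen : data.length ≤ i := by
      have := congrArg List.length hd; simp at this; omega
    have hi' : i = data.length := by omega
    subst hi'
    simp [sessionLoopA]
  | cons line rest' ih =>
    intro i j logs ann dk hd hj hi
    have hd' : data.drop (i + 1) = rest' := by
      rw [← List.tail_drop, hd]
      rfl
    have hlen : i < data.length := by
      have := congrArg List.length hd; simp at this; omega
    by_cases hA : pvIsAnnot line = true
    · have hA' : (decide (line.length > 4) && (PySem.List.pyGet? line 4 == some "annotate")) = true := hA
      simp only [sessionLoopA, hA', if_pos]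
      obtain ⟨h1, h2, h3⟩ := ih (i + 1) (i + 1) (logs ++ [PySem.List.slice data (some (j : Int)) (some (i : Int))])
        (ann ++ [PySem.List.slice line (some 0) (some 2) ++
                 [PySem.Str.join " " (PySem.List.slice line (some 5) none)]]) dk
        hd' (le_refl _) (by omega)
      refine ⟨?_, ?_, ?_⟩
      · rw [h1]; simp [hA]
      · rw [h2]; simp [hA]
      · rw [h3]
        have hnil : PySem.List.slice data (some ((i + 1 : Nat) : Int)) (some ((i + 1 : Nat) : Int)) = [] := by
          rw [PySem.List.slice_natCast]; simp
        simp only [List.foldl_cons]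
        rw [if_pos hA]
        push_cast at hnil ⊢
        rw [hnil]
    · have hA' : (decide (line.length > 4) && (PySem.List.pyGet? line 4 == some "annotate")) = false := by
        simpa [pvIsAnnot] using hA
      have hstep : ∀ dk', sessionLoopA data key (line :: rest') i (logs, ann, dk', j) =
          (if key == none || (decide (line.length > 2) && (PySem.List.pyGet? line 2 == key))
           then sessionLoopA data key rest' (i + 1) (logs, ann, dk' ++ [line], j)
           else sessionLoopA data key rest' (i + 1) (logs, ann, dk', j)) := by
        intro dk'; simp [sessionLoopA, hA']
      have hAf : pvIsAnnot line = false := by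
        revert hA; cases pvIsAnnot line <;> simp
      have hslice := pvSlice_succ data line rest' i j hd hj
      by_cases hK : (key == none || (decide (line.length > 2) && (PySem.List.pyGet? line 2 == key))) = true
      · obtain ⟨h1, h2, h3⟩ := ih (i + 1) j logs ann (dk ++ [line]) hd' (by omega) (by omega)
        rw [hstep dk, if_pos hK]
        have hpt : (!pvIsAnnot line && (key == none || (decide (line.length > 2) && (PySem.List.pyGet? line 2 == key)))) = true := by
          rw [hAf, hK]; rfl
        refine ⟨?_, ?_, ?_⟩
        · rw [h1]; simp [hAf]
        · rw [h2]
          simp only [List.filter_cons]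
          rw [hpt]
          simp
        · rw [h3]
          simp only [List.foldl_cons]
          rw [if_neg hA, pvAppendLast_append]
          push_cast at hslice ⊢
          rw [hslice]
      · obtain ⟨h1, h2, h3⟩ := ih (i + 1) j logs ann dk hd' (by omega) (by omega)
        rw [hstep dk, if_neg hK]
        have hKf : (key == none || (decide (line.length > 2) && (PySem.List.pyGet? line 2 == key))) = false := by
          revert hK; cases (key == none || (decide (line.length > 2) && (PySem.List.pyGet? line 2 == key))) <;> simp
        have hpf : (!pvIsAnnot line && (key == none || (decide (line.length > 2) && (PySem.List.pyGet? line 2 == key)))) = false := by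
          rw [hAf, hKf]; rfl
        refine ⟨?_, ?_, ?_⟩
        · rw [h1]; simp [hAf]
        · rw [h2]
          simp only [List.filter_cons]
          rw [hpf]
          simp
        · rw [h3]
          simp only [List.foldl_cons]
          rw [if_neg hA, pvAppendLast_append]
          push_cast at hslice ⊢
          rw [hslice]

-- ===== VERDICT (by name: the statement is the Claim_ definition above) =====
theorem session_parse_spec : Claim_equal_session_parse := by
  intro data key _ hpre
  unfold Spec_session_parse
  match data with
  | [] => exact absurd rfl hpre
  | d :: ds =>
    obtain ⟨h1, h2, h3⟩ := sessionLoopA_inv (d :: ds) key (d :: ds) 0 0 [] [] []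
      (by simp) (le_refl _) (by simp)
    show ((sessionLoopA (d :: ds) key (d :: ds) 0 ([], [], [], 0)).1 ++ [_],
          (sessionLoopA (d :: ds) key (d :: ds) 0 ([], [], [], 0)).2.1,
          (sessionLoopA (d :: ds) key (d :: ds) 0 ([], [], [], 0)).2.2.1) = _
    unfold session_parse_alt
    have hz : PySem.List.slice (d :: ds) (some ((0 : Nat) : Int)) (some ((0 : Nat) : Int)) = [] := by
      rw [PySem.List.slice_natCast]; simp
    push_cast at hz h3
    rw [hz] at h3
    simp only [List.nil_append] at h1 h2 h3
    exact Prod.ext (by exact h3) (Prod.ext (by exact h1) (by exact h2))
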